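-- pv_equiv track=rewrite | github.com/HAPPY3N1GMA/ctf-tools | binary/papa_rop.py | xor_encode
-- ===== SOURCE A (Python) =====
-- def xor_encode(what, avoid):
--     cipher = ""
--     decrypt_key = ""
--     # Encode each character
--     for char in what:
--         plain = ord(char)
--         # Check the character actually needs encoding
--         if ((plain in avoid) or (0 in avoid)):
--             # Find character to encode with
--             found = False
--             for key in range(256):
--                 if ((key in avoid) or (plain ^ key in avoid)):
--                     continue
--                 cipher += chr(plain ^ key)
--                 decrypt_key += chr(key)
--                 found = True
--                 break
--
--             # Error if couldn't do conversion
--             if (not found):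
--                 log.failure("Couldn't XOR encode: " + char)
--                 exit(1)
--
--         # Otherwise just xor with null
--         else:
--             cipher += char
--             decrypt_key += "\x00"
--
--     return (cipher, decrypt_key)
-- ===== SOURCE B (Python) =====
-- def xor_encode(what, avoid):
--     # Precompute once, for every possible byte value, the first usable XOR key
--     # (key=0 covers bytes that need no encoding); then encoding is a table lookup.
--     avoid_set = set(avoid)
--     allowed = [k for k in range(256) if k not in avoid_set]
--     table = [next((k for k in allowed if p ^ k not in avoid_set), None)
--              for p in range(256)]
--     keys = [table[ord(c)] for c in what]
--     for c, k in zip(what, keys):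
--         if k is None:
--             log.failure("Couldn't XOR encode: " + c)
--             exit(1)
--     cipher = "".join(chr(ord(c) ^ k) for c, k in zip(what, keys))
--     return (cipher, "".join(map(chr, keys)))
-- ===== Notes on version B (the rewrite author's own statement) =====
-- stated objective: alternative
-- what changed: Replaces A's per-character guarded fast-path/256-key search by a 256-entry key table precomputed once from avoid, so each character is encoded by a single table lookup and the outputs are built by staged map/zip passes instead of A's accumulating loop.
import Mathlib
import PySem

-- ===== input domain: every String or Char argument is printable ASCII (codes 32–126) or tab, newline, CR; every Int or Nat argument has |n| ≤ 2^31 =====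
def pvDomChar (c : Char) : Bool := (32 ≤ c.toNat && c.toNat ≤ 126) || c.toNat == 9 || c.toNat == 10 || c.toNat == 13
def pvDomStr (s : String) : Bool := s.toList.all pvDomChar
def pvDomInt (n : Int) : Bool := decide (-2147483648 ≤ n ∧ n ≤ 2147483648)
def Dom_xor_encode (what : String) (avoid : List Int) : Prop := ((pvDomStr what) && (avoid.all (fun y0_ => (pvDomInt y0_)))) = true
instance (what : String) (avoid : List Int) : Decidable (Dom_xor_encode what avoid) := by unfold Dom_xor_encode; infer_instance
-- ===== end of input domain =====

-- B differs from A: a 256-entry key table is precomputed once from avoid and the outputs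
-- are built by staged map/zip passes, instead of A's per-character guarded search loop.
-- A's exit(1) path is outside Pre_; both ports return ("","") there.

-- ===== PORT A =====
-- A's inner 'for key in range(256): if (key in avoid) or (plain ^ key in avoid): continue; ...; break'
def xor_encode_find (avoid : List Int) (plain : Nat) : Option Nat :=
  (List.range 256).find? (fun k => !(decide ((k : Int) ∈ avoid) || decide (((plain ^^^ k : Nat) : Int) ∈ avoid)))

-- A's outer loop, accumulating cipher and decrypt_key; none = exit(1)
def xor_encode_goA (avoid : List Int) : List Char → List Char → List Char → Option (List Char × List Char)
  | [], cip, dec => some (cip, dec)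
  | c :: rest, cip, dec =>
    let plain := c.toNat
    if ((plain : Int) ∈ avoid) ∨ ((0 : Int) ∈ avoid) then
      match xor_encode_find avoid plain with
      | some k => xor_encode_goA avoid rest (cip ++ [Char.ofNat (plain ^^^ k)]) (dec ++ [Char.ofNat k])
      | none => none
    else
      xor_encode_goA avoid rest (cip ++ [c]) (dec ++ [Char.ofNat 0])

def xor_encode (what : String) (avoid : List Int) : String × String :=
  match xor_encode_goA avoid what.toList [] [] with
  | some (cip, dec) => (String.ofList cip, String.ofList dec)
  | none => ("", "")

-- ===== PORT B =====
-- B's precomputed table: allowed = keys outside avoid; table[p] = first allowed key with p^k outside avoid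
def xor_encode_table (avoid : List Int) : List (Option Nat) :=
  let allowed := (List.range 256).filter (fun k : Nat => !avoid.contains ((k : Int)))
  (List.range 256).map (fun p => allowed.find? (fun k : Nat => !avoid.contains (((p ^^^ k : Nat) : Int))))

def xor_encode_alt (what : String) (avoid : List Int) : String × String :=
  let table := xor_encode_table avoid
  let keys := what.toList.map (fun c => (PySem.List.pyGet? table ((c.toNat : Int))).join)
  if keys.all Option.isSome then
    (String.ofList ((what.toList.zip keys).map (fun ck => Char.ofNat (ck.1.toNat ^^^ ck.2.getD 0))),
     String.ofList (keys.map (fun k => Char.ofNat (k.getD 0))))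
  else ("", "")

-- ===== PRECONDITION & SPEC =====
-- Pre_ excludes exactly the inputs on which A reaches exit(1): some character of `what`
-- admits no key in 0..255 with both key and plain^key outside avoid (A raises SystemExit there).
def Pre_xor_encode (what : String) (avoid : List Int) : Prop :=
  (what.toList.all (fun c => (List.range 256).any (fun k =>
    !(avoid.contains (k : Int)) && !(avoid.contains ((c.toNat ^^^ k : Nat) : Int))))) = true
instance (what : String) (avoid : List Int) : Decidable (Pre_xor_encode what avoid) := by
  unfold Pre_xor_encode; infer_instance

def pvWitness_xor_encode : String × List Int := ("Hi", [10, 72])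

def Spec_xor_encode (what : String) (avoid : List Int) (out : String × String) : Prop := out = xor_encode_alt what avoid
instance (what : String) (avoid : List Int) (out : String × String) : Decidable (Spec_xor_encode what avoid out) := by unfold Spec_xor_encode; infer_instance

-- ===== CLAIM (what is proved, stated in full; the proofs are below) =====
def Claim_equal_xor_encode : Prop := ∀ (what : String) (avoid : List Int), Dom_xor_encode what avoid → Pre_xor_encode what avoid → Spec_xor_encode what avoid (xor_encode what avoid)

-- ===== LEMMAS AND PROOFS =====

-- B's table lookup at a byte value p < 256 is exactly A's first-valid-key search
theorem xor_encode_table_get (avoid : List Int) (p : Nat) (hp : p < 256) :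
    (PySem.List.pyGet? (xor_encode_table avoid) ((p : Int))).join = xor_encode_find avoid p := by
  unfold xor_encode_table xor_encode_find
  rw [PySem.List.pyGet?_natCast, List.getElem?_map, List.getElem?_range hp]
  simp only [Option.map_some, Option.join_some, List.find?_filter]
  congr 1
  funext k
  simp [Bool.not_or]

-- when no encoding is needed, the search returns key 0 (A's else branch)
theorem xor_encode_find_zero (avoid : List Int) (plain : Nat)
    (h0 : (0 : Int) ∉ avoid) (hp : ((plain : Int)) ∉ avoid) :
    xor_encode_find avoid plain = some 0 := by
  unfold xor_encode_find
  have : List.range 256 = 0 :: List.map Nat.succ (List.range 255) := List.range_succ_eq_map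
  rw [this, List.find?_cons]
  simp [h0, hp]

-- A's loop computes, when it succeeds, the per-character map through the search
theorem xor_encode_goA_eq (avoid : List Int) :
    ∀ (cs : List Char) (cip dec : List Char),
      xor_encode_goA avoid cs cip dec =
        if (cs.map (fun c => xor_encode_find avoid c.toNat)).all Option.isSome then
          some (cip ++ cs.map (fun c => Char.ofNat (c.toNat ^^^ (xor_encode_find avoid c.toNat).getD 0)),
                dec ++ cs.map (fun c => Char.ofNat ((xor_encode_find avoid c.toNat).getD 0)))
        else none := by
  intro cs
  induction cs with
  | nil => intro cip dec; simp [xor_encode_goA]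
  | cons c rest ih =>
    intro cip dec
    simp only [xor_encode_goA, List.map_cons, List.all_cons]
    by_cases h : ((c.toNat : Int) ∈ avoid) ∨ ((0 : Int) ∈ avoid)
    · rw [if_pos h]
      cases hf : xor_encode_find avoid c.toNat with
      | none => simp
      | some k =>
        simp [ih, List.append_assoc]
    · have h' := not_or.mp h
      rw [if_neg h, xor_encode_find_zero avoid c.toNat h'.2 h'.1, ih]
      simp [List.append_assoc]

-- ===== VERDICT (by name: the statement is the Claim_ definition above) =====
theorem xor_encode_spec : Claim_equal_xor_encode := by
  intro what avoid hdom _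
  have hlt : ∀ c ∈ what.toList, c.toNat < 256 := by
    intro c hc
    have h1 : pvDomStr what = true := by
      have := (Bool.and_eq_true _ _).mp hdom
      exact this.1
    have h2 := List.all_eq_true.mp h1 c hc
    unfold pvDomChar at h2
    simp only [Bool.or_eq_true, Bool.and_eq_true, decide_eq_true_eq, beq_iff_eq] at h2
    omega
  unfold Spec_xor_encode xor_encode xor_encode_alt
  simp only []
  have hk : what.toList.map (fun c => (PySem.List.pyGet? (xor_encode_table avoid) ((c.toNat : Int))).join)
      = what.toList.map (fun c => xor_encode_find avoid c.toNat) :=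
    List.map_congr_left (fun c hc => xor_encode_table_get avoid c.toNat (hlt c hc))
  rw [hk, xor_encode_goA_eq]
  have hz : what.toList.zip (what.toList.map (fun c => xor_encode_find avoid c.toNat))
      = what.toList.map (fun c => (c, xor_encode_find avoid c.toNat)) := by
    have := @List.zip_map' _ _ _ id (fun c => xor_encode_find avoid c.toNat) what.toList
    simpa using this
  split_ifs with h
  · simp [hz, List.map_map, Function.comp_def]
  · rfl
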